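-- pv_equiv track=rewrite | github.com/145nt3aw/rule_lint | backend/preview.py | _top_level_addops
-- ===== SOURCE A (Python) =====
-- from typing import Dict, List, Optional, Tuple
--
-- def _top_level_addops(s: str) -> List[Tuple[int, str]]:
--     """Find indices of `+`/`-` operators at bracket-depth 0. Skip the
--     very first char so a leading `-` (unary minus) doesn't count.
--     """
--     out: List[Tuple[int, str]] = []
--     depth = 0
--     for i, c in enumerate(s):
--         if c in "([{":
--             depth += 1
--         elif c in ")]}":
--             depth -= 1
--         elif depth == 0 and i > 0 and c in "+-":
--             # Skip if the preceding char is another operator (handles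
--             # things like `x * -1`).
--             prev = s[i - 1]
--             if prev in "+-*/<>=,(":
--                 continue
--             out.append((i, c))
--     return out
-- ===== SOURCE B (Python) =====
-- from typing import Dict, List, Optional, Tuple
--
-- def _top_level_addops(s: str) -> List[Tuple[int, str]]:
--     """Prefix-depth table + one filtering pass (different decomposition,
--     same result as the single-loop accumulator version)."""
--     depths = [0]
--     for c in s:
--         depths.append(depths[-1] + (1 if c in "([{" else -1 if c in ")]}" else 0))
--     return [(i, c) for i, c in enumerate(s)
--             if depths[i] == 0 and i > 0 and c in "+-"
--             and s[i - 1] not in "+-*/<>=,("]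
-- ===== Notes on version B (the rewrite author's own statement) =====
-- stated objective: alternative
-- what changed: Replaces the single loop with an inline running depth counter and append-accumulator by a materialised prefix bracket-depth table built in one pass and a separate filtering comprehension over enumerate(s) that consults the table.
import Mathlib
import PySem

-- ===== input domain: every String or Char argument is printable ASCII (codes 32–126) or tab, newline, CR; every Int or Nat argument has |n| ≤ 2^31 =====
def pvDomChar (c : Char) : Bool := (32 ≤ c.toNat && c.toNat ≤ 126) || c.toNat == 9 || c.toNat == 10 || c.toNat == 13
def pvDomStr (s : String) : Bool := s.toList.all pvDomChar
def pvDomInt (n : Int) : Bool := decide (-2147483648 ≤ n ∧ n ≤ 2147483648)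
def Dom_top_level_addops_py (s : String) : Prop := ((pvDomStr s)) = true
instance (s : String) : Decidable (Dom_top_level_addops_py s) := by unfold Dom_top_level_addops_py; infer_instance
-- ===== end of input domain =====

-- B replaces A's single loop with an inline running depth counter by a materialised
-- prefix bracket-depth table plus a separate filtering pass; same results (alternative decomposition).

-- ===== PORT A =====
-- single loop over enumerate(s) with state (out, depth)
def top_level_addops_py (s : String) : List (Int × String) :=
  let cs := s.toList
  let st := (PySem.List.enumerate cs).foldl (fun (st : List (Int × String) × Int) ic =>
    let i := ic.1
    let c := ic.2
    if ['(', '[', '{'].contains c then (st.1, st.2 + 1)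
    else if [')', ']', '}'].contains c then (st.1, st.2 - 1)
    else if st.2 == 0 && decide (i > 0) && ['+', '-'].contains c then
      -- prev = s[i-1]; here i > 0 so the index is in range
      match PySem.List.pyGet? cs (i - 1) with
      | some prev => if ['+','-','*','/','<','>','=',',','('].contains prev then st
                     else (st.1 ++ [(i, c.toString)], st.2)
      | none => st
    else st) ([], (0 : Int))
  st.1

-- ===== PORT B =====
-- pass 1: depths table, depths[i] = bracket depth before s[i]; pass 2: filter enumerate(s)
def top_level_addops_py_alt (s : String) : List (Int × String) :=
  let cs := s.toList
  let depths := cs.foldl (fun (ds : List Int) c =>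
      ds ++ [PySem.List.pyGetD ds (-1) 0 + (if ['(', '[', '{'].contains c then (1 : Int)
                            else if [')', ']', '}'].contains c then -1 else 0)]) [(0 : Int)]
  (PySem.List.enumerate cs).filterMap (fun ic =>
    let i := ic.1
    let c := ic.2
    if PySem.List.pyGetD depths i 1 == 0 && decide (i > 0) && ['+', '-'].contains c &&
       !(['+','-','*','/','<','>','=',',','('].contains (PySem.List.pyGetD cs (i - 1) ' ')) then
      some (i, c.toString)
    else none)

-- ===== PRECONDITION & SPEC =====
def Spec_top_level_addops_py (s : String) (out : List (Int × String)) : Prop := out = top_level_addops_py_alt s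
instance (s : String) (out : List (Int × String)) : Decidable (Spec_top_level_addops_py s out) := by unfold Spec_top_level_addops_py; infer_instance

-- ===== CLAIM (what is proved, stated in full; the proofs are below) =====
def Claim_equal_top_level_addops_py : Prop := ∀ (s : String), Dom_top_level_addops_py s → Spec_top_level_addops_py s (top_level_addops_py s)

-- ===== LEMMAS AND PROOFS =====

def pvDelta (c : Char) : Int :=
  if ['(', '[', '{'].contains c then (1 : Int)
  else if [')', ']', '}'].contains c then -1 else 0

def pvDsum (l : List Char) : Int := (l.map pvDelta).sum

-- common reference: emit predicate at index k over the full char list cs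
def pvEmit (cs : List Char) (k : Nat) (c : Char) : Bool :=
  (pvDsum (cs.take k) == 0 && decide ((k : Int) > 0) && ['+', '-'].contains c) &&
  !(match PySem.List.pyGet? cs ((k : Int) - 1) with
    | some p => ['+','-','*','/','<','>','=',',','('].contains p
    | none => false)

def pvGo (cs : List Char) (k : Nat) : List Char → List (Int × String)
  | [] => []
  | c :: t => (if pvEmit cs k c then [((k : Int), c.toString)] else []) ++ pvGo cs (k + 1) t

theorem pvDsum_append (l : List Char) (c : Char) : pvDsum (l ++ [c]) = pvDsum l + pvDelta c := by
  simp [pvDsum]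

theorem pvOpen_not_pm {c : Char} (h : (['(', '[', '{'].contains c) = true) :
    (['+', '-'].contains c) = false := by
  have : c = '(' ∨ c = '[' ∨ c = '{' := by simpa using h
  rcases this with rfl | rfl | rfl <;> decide

theorem pvClose_not_pm {c : Char} (h : ([')', ']', '}'].contains c) = true) :
    (['+', '-'].contains c) = false := by
  have : c = ')' ∨ c = ']' ∨ c = '}' := by simpa using h
  rcases this with rfl | rfl | rfl <;> decide

theorem pvA_loop (cs pre tail : List Char) (acc : List (Int × String))
    (h : cs = pre ++ tail) :
    (PySem.List.enumerate tail (pre.length : Int)).foldl (fun (st : List (Int × String) × Int) ic =>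
      let i := ic.1
      let c := ic.2
      if ['(', '[', '{'].contains c then (st.1, st.2 + 1)
      else if [')', ']', '}'].contains c then (st.1, st.2 - 1)
      else if st.2 == 0 && decide (i > 0) && ['+', '-'].contains c then
        match PySem.List.pyGet? cs (i - 1) with
        | some prev => if ['+','-','*','/','<','>','=',',','('].contains prev then st
                       else (st.1 ++ [(i, c.toString)], st.2)
        | none => st
      else st) (acc, pvDsum pre)
    = (acc ++ pvGo cs pre.length tail, pvDsum cs) := by
  induction tail generalizing pre acc with
  | nil =>
    subst h
    simp [PySem.List.enumerate, pvGo]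
  | cons c t ih =>
    rw [PySem.List.enumerate_cons, List.foldl_cons]
    have htake : cs.take pre.length = pre := by
      rw [h]; exact List.take_left
    have hcs' : cs = (pre ++ [c]) ++ t := by simp [h]
    have hlen : (((pre ++ [c]).length : Nat) : Int) = (pre.length : Int) + 1 := by simp
    have ihx := ih (pre ++ [c])
    rw [hlen, show (pre ++ [c]).length = pre.length + 1 by simp] at ihx
    by_cases h1 : (['(', '[', '{'].contains c) = true
    · have hdelta : pvDelta c = 1 := by unfold pvDelta; rw [if_pos h1]
      have hd : pvDsum (pre ++ [c]) = pvDsum pre + 1 := by rw [pvDsum_append, hdelta]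
      have hemit : pvEmit cs pre.length c = false := by
        unfold pvEmit; rw [pvOpen_not_pm h1]; simp
      simp only [h1, if_true]
      rw [show (acc, pvDsum pre + 1) = (acc, pvDsum (pre ++ [c])) by rw [hd]]
      rw [ihx acc hcs']
      simp [pvGo, hemit]
    · by_cases h2 : ([')', ']', '}'].contains c) = true
      · have hdelta : pvDelta c = -1 := by unfold pvDelta; rw [if_neg h1, if_pos h2]
        have hd : pvDsum (pre ++ [c]) = pvDsum pre - 1 := by
          rw [pvDsum_append, hdelta]; ring
        have hemit : pvEmit cs pre.length c = false := by
          unfold pvEmit; rw [pvClose_not_pm h2]; simp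
        simp only [h1, h2, if_false, if_true, Bool.false_eq_true]
        rw [show (acc, pvDsum pre - 1) = (acc, pvDsum (pre ++ [c])) by rw [hd]]
        rw [ihx acc hcs']
        simp [pvGo, hemit]
      · -- non-bracket char: depth unchanged
        have hdelta : pvDelta c = 0 := by unfold pvDelta; rw [if_neg h1, if_neg h2]
        have hd : pvDsum (pre ++ [c]) = pvDsum pre := by
          rw [pvDsum_append, hdelta]; ring
        have hkl : pre.length < cs.length := by rw [h]; simp
        have hstep :
            (if pvDsum pre == 0 && decide ((pre.length : Int) > 0) && ['+', '-'].contains c then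
              match PySem.List.pyGet? cs ((pre.length : Int) - 1) with
              | some prev => if ['+','-','*','/','<','>','=',',','('].contains prev then (acc, pvDsum pre)
                             else (acc ++ [((pre.length : Int), c.toString)], pvDsum pre)
              | none => (acc, pvDsum pre)
             else (acc, pvDsum pre))
            = (acc ++ (if pvEmit cs pre.length c then [((pre.length : Int), c.toString)] else []), pvDsum pre) := by
          by_cases hc : (pvDsum pre == 0 && decide ((pre.length : Int) > 0) && ['+', '-'].contains c) = true
          · have hkpos : 0 < pre.length := by
              have := hc
              simp only [Bool.and_eq_true, decide_eq_true_eq] at this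
              exact_mod_cast this.1.2
            have hidx : ((pre.length : Int) - 1) = (((pre.length - 1 : Nat)) : Int) := by
              omega
            have hp : PySem.List.pyGet? cs ((pre.length : Int) - 1)
                = some (cs[pre.length - 1]'(by omega)) := by
              rw [hidx, PySem.List.pyGet?_natCast]
              exact List.getElem?_eq_getElem (by omega)
            rw [if_pos hc, hp]
            unfold pvEmit
            rw [htake, hp, hc]
            by_cases hop : (['+','-','*','/','<','>','=',',','('].contains
                (cs[pre.length - 1]'(by omega))) = true
            · simp only [List.contains_eq_mem, decide_eq_true_eq, List.mem_cons,
                List.mem_singleton, List.not_mem_nil, or_false] at hop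
              rcases hop with hq | hq | hq | hq | hq | hq | hq | hq | hq <;> simp [hq]
            · simp only [List.contains_eq_mem, decide_eq_true_eq, List.mem_cons,
                List.mem_singleton, List.not_mem_nil, or_false] at hop
              push_neg at hop
              obtain ⟨n1, n2, n3, n4, n5, n6, n7, n8, n9⟩ := hop
              simp [n1, n2, n3, n4, n5, n6, n7, n8, n9]
          · have hx : (pvDsum pre == 0 && decide ((pre.length : Int) > 0) && ['+', '-'].contains c) = false := by
              revert hc
              cases pvDsum pre == 0 && decide ((pre.length : Int) > 0) && ['+', '-'].contains c <;> simp
            have hemit : pvEmit cs pre.length c = false := by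
              unfold pvEmit; rw [htake, hx]; simp
            rw [if_neg hc, hemit]
            simp
        simp only [h1, h2, if_false, Bool.false_eq_true]
        rw [hstep]
        rw [show (acc ++ (if pvEmit cs pre.length c then [((pre.length : Int), c.toString)] else []), pvDsum pre)
              = (acc ++ (if pvEmit cs pre.length c then [((pre.length : Int), c.toString)] else []), pvDsum (pre ++ [c])) by rw [hd]]
        rw [ihx _ hcs']
        simp [pvGo, List.append_assoc]

-- the depths table as an explicit scan
def pvScan (d : Int) : List Char → List Int
  | [] => []
  | c :: t => (d + pvDelta c) :: pvScan (d + pvDelta c) t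

theorem pvFold_scan (cs : List Char) : ∀ (ds : List Int) (d : Int),
    cs.foldl (fun (ds : List Int) c =>
      ds ++ [PySem.List.pyGetD ds (-1) 0 + (if ['(', '[', '{'].contains c then (1 : Int)
                            else if [')', ']', '}'].contains c then -1 else 0)]) (ds ++ [d])
    = ds ++ [d] ++ pvScan d cs := by
  induction cs with
  | nil => intro ds d; simp [pvScan]
  | cons c t ih =>
    intro ds d
    rw [List.foldl_cons]
    have hlast : PySem.List.pyGetD (ds ++ [d]) (-1) 0 = d :=
      PySem.List.pyGetD_neg_one_append_singleton ds d 0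
    rw [hlast]
    have hdelta : (d + (if ['(', '[', '{'].contains c then (1 : Int)
                            else if [')', ']', '}'].contains c then -1 else 0))
        = d + pvDelta c := by simp only [pvDelta]
    rw [hdelta, ih (ds ++ [d]) (d + pvDelta c)]
    simp [pvScan, List.append_assoc]

theorem pvScan_get (cs : List Char) : ∀ (d : Int) (k : Nat), k < cs.length →
    (pvScan d cs)[k]? = some (d + pvDsum (cs.take (k + 1))) := by
  induction cs with
  | nil => intro d k hk; simp at hk
  | cons c t ih =>
    intro d k hk
    cases k with
    | zero => simp [pvScan, pvDsum]
    | succ k =>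
      have hk' : k < t.length := by simpa using hk
      simp only [pvScan, List.getElem?_cons_succ]
      rw [ih (d + pvDelta c) k hk']
      simp [pvDsum]
      ring_nf
  
theorem pvDepths_get (cs : List Char) (k : Nat) (hk : k ≤ cs.length) :
    (cs.foldl (fun (ds : List Int) c =>
      ds ++ [PySem.List.pyGetD ds (-1) 0 + (if ['(', '[', '{'].contains c then (1 : Int)
                            else if [')', ']', '}'].contains c then -1 else 0)]) [(0 : Int)])[k]?
    = some (pvDsum (cs.take k)) := by
  have h0 : ([] : List Int) ++ [(0 : Int)] = [(0 : Int)] := rfl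
  rw [← h0, pvFold_scan cs [] 0]
  cases k with
  | zero => simp [pvDsum]
  | succ k =>
    have hk' : k < cs.length := by omega
    simp only [List.nil_append, List.cons_append, List.getElem?_cons_succ]
    rw [pvScan_get cs 0 k hk']
    simp

theorem pvB_loop (cs pre tail : List Char) (h : cs = pre ++ tail) :
    (PySem.List.enumerate tail (pre.length : Int)).filterMap (fun ic =>
      let i := ic.1
      let c := ic.2
      if PySem.List.pyGetD (cs.foldl (fun (ds : List Int) c =>
            ds ++ [PySem.List.pyGetD ds (-1) 0 + (if ['(', '[', '{'].contains c then (1 : Int)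
                                  else if [')', ']', '}'].contains c then -1 else 0)]) [(0 : Int)]) i 1 == 0
         && decide (i > 0) && ['+', '-'].contains c &&
         !(['+','-','*','/','<','>','=',',','('].contains (PySem.List.pyGetD cs (i - 1) ' ')) then
        some (i, c.toString)
      else none)
    = pvGo cs pre.length tail := by
  induction tail generalizing pre with
  | nil => simp [PySem.List.enumerate, pvGo]
  | cons c t ih =>
    rw [PySem.List.enumerate_cons, List.filterMap_cons]
    have htake : cs.take pre.length = pre := by
      rw [h]; exact List.take_left
    have hcs' : cs = (pre ++ [c]) ++ t := by simp [h]
    have hlen : (((pre ++ [c]).length : Nat) : Int) = (pre.length : Int) + 1 := by simp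
    have ihx := ih (pre ++ [c]) hcs'
    rw [hlen, show (pre ++ [c]).length = pre.length + 1 by simp] at ihx
    have hkl : pre.length < cs.length := by rw [h]; simp
    have hdep : PySem.List.pyGetD (cs.foldl (fun (ds : List Int) c =>
            ds ++ [PySem.List.pyGetD ds (-1) 0 + (if ['(', '[', '{'].contains c then (1 : Int)
                                  else if [')', ']', '}'].contains c then -1 else 0)]) [(0 : Int)])
          ((pre.length : Nat) : Int) 1 = pvDsum pre := by
      rw [PySem.List.pyGetD_natCast]
      rw [List.getD_eq_getElem?_getD, pvDepths_get cs pre.length (le_of_lt hkl), htake]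
      rfl
    rw [pvGo]
    by_cases hkpos : 0 < pre.length
    · have hprev : PySem.List.pyGetD cs ((pre.length : Int) - 1) ' '
          = cs[((pre.length : Int) - 1).toNat] := by
        apply PySem.List.pyGetD_eq_getElem
        · omega
        · push_cast; omega
      have hget : PySem.List.pyGet? cs ((pre.length : Int) - 1)
          = some cs[((pre.length : Int) - 1).toNat] := by
        apply PySem.List.pyGet?_eq_some_getElem
        · omega
        · push_cast; omega
      have hcond : (PySem.List.pyGetD (cs.foldl (fun (ds : List Int) c =>
            ds ++ [PySem.List.pyGetD ds (-1) 0 + (if ['(', '[', '{'].contains c then (1 : Int)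
                                  else if [')', ']', '}'].contains c then -1 else 0)]) [(0 : Int)])
            ((pre.length : Nat) : Int) 1 == 0
           && decide (((pre.length : Nat) : Int) > 0) && ['+', '-'].contains c &&
           !(['+','-','*','/','<','>','=',',','('].contains
              (PySem.List.pyGetD cs (((pre.length : Nat) : Int) - 1) ' ')))
          = pvEmit cs pre.length c := by
        rw [hdep, hprev]
        unfold pvEmit
        rw [htake, hget]
      by_cases he : pvEmit cs pre.length c = true
      · simp only [hcond, he, if_true, ihx]
        simp
      · have he' : pvEmit cs pre.length c = false := by
          revert he; cases pvEmit cs pre.length c <;> simp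
        simp only [hcond, he', if_false, Bool.false_eq_true, ihx]
        simp [he']
    · have hfalse : decide (((pre.length : Nat) : Int) > 0) = false := by
        rw [decide_eq_false_iff_not]; omega
      have he : pvEmit cs pre.length c = false := by
        unfold pvEmit; rw [hfalse]; simp
      rw [he]
      simp only [hfalse, Bool.and_false, Bool.false_and, if_false, Bool.false_eq_true, ihx]
      simp

-- ===== VERDICT (by name: the statement is the Claim_ definition above) =====
theorem top_level_addops_py_spec : Claim_equal_top_level_addops_py := by
  intro s _
  have e1 : top_level_addops_py s = [] ++ pvGo s.toList 0 s.toList :=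
    congrArg Prod.fst (pvA_loop s.toList [] s.toList [] rfl)
  have e2 : top_level_addops_py_alt s = pvGo s.toList 0 s.toList :=
    pvB_loop s.toList [] s.toList rfl
  unfold Spec_top_level_addops_py
  rw [e1, e2, List.nil_append]
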